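-- pv_equiv track=rewrite | github.com/tusharkoley/Project_euler | Euler35.py | get_circular_nums
-- ===== SOURCE A (Python) =====
-- def get_circular_nums(num):
--     num_lst = []
--     div = 10
--     n=0
--     while num>=div:
--         div = div*10
--         n = n+1
--     div=div//10
--     num_lst.append(num)
--     for _ in range(n):
--         f_dgit = num%10
--         other_digits = num//10
--         num = f_dgit*div + other_digits
--         num_lst.append(num)
--     return list(set(num_lst))
-- ===== SOURCE B (Python) =====
-- def get_circular_nums(num):
--     k = 1
--     while 10 ** k <= num:
--         k += 1
--     return list({num % 10 ** i * 10 ** (k - i) + num // 10 ** i for i in range(k)})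
-- ===== Notes on version B (the rewrite author's own statement) =====
-- stated objective: alternative
-- what changed: Each rotation is computed independently from num by one closed-form divmod split (num % 10**i moved in front of num // 10**i) inside a set comprehension, instead of A's stateful loop that derives every rotation from the previous one digit by digit; the digit count comes from one power comparison loop instead of A's growing-divisor bookkeeping.
import Mathlib
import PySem

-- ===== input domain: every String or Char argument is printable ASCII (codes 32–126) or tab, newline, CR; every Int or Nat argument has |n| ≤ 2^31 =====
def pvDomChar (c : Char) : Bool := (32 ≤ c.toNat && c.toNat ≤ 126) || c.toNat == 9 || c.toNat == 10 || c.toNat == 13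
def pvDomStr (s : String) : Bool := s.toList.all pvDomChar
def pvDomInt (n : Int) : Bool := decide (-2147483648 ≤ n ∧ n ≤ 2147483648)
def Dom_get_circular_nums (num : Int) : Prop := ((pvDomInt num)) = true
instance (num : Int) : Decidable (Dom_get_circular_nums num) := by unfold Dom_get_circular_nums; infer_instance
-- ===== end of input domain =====

-- B replaces A's chained one-digit-at-a-time rotation loop by a comprehension computing each
-- rotation independently from num with one divmod split (alternative decomposition, same cost).
-- list(set(...)) is ported on both sides as first-occurrence dedup (outputs are compared as sets).

-- ===== PORT A =====
-- while num >= div: div *= 10; n += 1     ('0 < div' is a totality guard only; the call site has div = 10)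
def gcnDivLoop (num div : Int) (n : Nat) : Int × Nat :=
  if h : 0 < div ∧ div ≤ num then gcnDivLoop num (div * 10) (n + 1) else (div, n)
  termination_by (num + 1 - div).toNat
  decreasing_by omega

def get_circular_nums (num : Int) : List Int :=
  let p := gcnDivLoop num 10 0
  let div := PySem.Int.floordiv p.1 10
  let st := (List.range p.2).foldl (fun (st : Int × List Int) _ =>
      let f_dgit := PySem.Int.mod st.1 10
      let other_digits := PySem.Int.floordiv st.1 10
      let nm := f_dgit * div + other_digits
      (nm, st.2 ++ [nm])) (num, [num])
  PySem.Set.ofList st.2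

-- ===== PORT B =====
-- while 10 ** k <= num: k += 1
def gcnNumDigits (num : Int) (k : Nat) : Nat :=
  if h : (10 : Int) ^ k ≤ num then gcnNumDigits num (k + 1) else k
  termination_by (num + 1 - 10 ^ k).toNat
  decreasing_by
    have h1 : (1 : Int) ≤ 10 ^ k := one_le_pow₀ (by norm_num)
    omega

def get_circular_nums_alt (num : Int) : List Int :=
  let k := gcnNumDigits num 1
  PySem.Set.ofList ((List.range k).map (fun i =>
    PySem.Int.mod num ((10 : Int) ^ i) * (10 : Int) ^ (k - i) + PySem.Int.floordiv num ((10 : Int) ^ i)))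

-- ===== PRECONDITION & SPEC =====
def Spec_get_circular_nums (num : Int) (out : List Int) : Prop := out = get_circular_nums_alt num
instance (num : Int) (out : List Int) : Decidable (Spec_get_circular_nums num out) := by unfold Spec_get_circular_nums; infer_instance

-- ===== CLAIM (what is proved, stated in full; the proofs are below) =====
def Claim_equal_get_circular_nums : Prop := ∀ (num : Int), Dom_get_circular_nums num → Spec_get_circular_nums num (get_circular_nums num)

-- ===== LEMMAS AND PROOFS =====

-- B's closed form for the i-th right rotation of num within k digit positions
def rotc (num : Int) (k i : Nat) : Int :=
  PySem.Int.mod num ((10 : Int) ^ i) * (10 : Int) ^ (k - i) + PySem.Int.floordiv num ((10 : Int) ^ i)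

theorem rotc_zero (num : Int) (k : Nat) : rotc num k 0 = num := by
  simp [rotc, PySem.Int.mod, PySem.Int.floordiv]

-- A's digit-count loop agrees with B's
theorem gcnDivLoop_eq (num : Int) (k : Nat) (hk : 1 ≤ k) :
    gcnDivLoop num ((10 : Int) ^ k) (k - 1) =
      ((10 : Int) ^ (gcnNumDigits num k), gcnNumDigits num k - 1) := by
  fun_induction gcnNumDigits num k with
  | case1 k h ih =>
    rw [gcnDivLoop, dif_pos ⟨pow_pos (by norm_num) k, h⟩]
    rw [show (10 : Int) ^ k * 10 = 10 ^ (k + 1) from (pow_succ 10 k).symm,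
        show k - 1 + 1 = (k + 1) - 1 by omega]
    exact ih (by omega)
  | case2 k h =>
    rw [gcnDivLoop]
    simp [h]

theorem gcnNumDigits_le (num : Int) (k : Nat) : k ≤ gcnNumDigits num k := by
  fun_induction gcnNumDigits num k with
  | case1 k h ih => omega
  | case2 k h => omega

-- Euclidean div/mod characterised by the decomposition (positive divisor)
theorem divu (a b q r : Int) (hb : 0 < b) (h : a = b * q + r) (h0 : 0 ≤ r) (hr : r < b) : a / b = q := by
  rw [h, show b * q + r = r + q * b by ring, Int.add_mul_ediv_right _ _ hb.ne',
     Int.ediv_eq_zero_of_lt h0 hr, zero_add]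

theorem modu (a b q r : Int) (h : a = b * q + r) (h0 : 0 ≤ r) (hr : r < b) : a % b = r := by
  rw [h, show b * q + r = r + q * b by ring, Int.add_mul_emod_self_right, Int.emod_eq_of_lt h0 hr]

-- one rotation step in pure Int arithmetic (P = 10^i, Q = 10^(k-i-1))
theorem step_core (num P Q : Int) (hP : 0 < P) :
    (num % P * (10 * Q) + num / P) % 10 * (P * Q) + (num % P * (10 * Q) + num / P) / 10 =
      num % (P * 10) * Q + num / (P * 10) := by
  set q1 := num / P with hq1
  set r1 := num % P with hr1
  have hnum : num = P * q1 + r1 := (Int.mul_ediv_add_emod num P).symm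
  have hr1b : 0 ≤ r1 ∧ r1 < P := ⟨Int.emod_nonneg _ hP.ne', Int.emod_lt_of_pos _ hP⟩
  set q2 := q1 / 10 with hq2
  set r2 := q1 % 10 with hr2
  have hq1e : q1 = 10 * q2 + r2 := (Int.mul_ediv_add_emod q1 10).symm
  have hr2b : 0 ≤ r2 ∧ r2 < 10 := ⟨Int.emod_nonneg _ (by norm_num), Int.emod_lt_of_pos _ (by norm_num)⟩
  have e1 : (r1 * (10 * Q) + q1) % 10 = r2 :=
    modu _ _ (r1 * Q + q2) _ (by rw [hq1e]; ring) hr2b.1 hr2b.2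
  have e2 : (r1 * (10 * Q) + q1) / 10 = r1 * Q + q2 :=
    divu _ _ (r1 * Q + q2) _ (by norm_num) (by rw [hq1e]; ring) hr2b.1 hr2b.2
  have hrem : 0 ≤ r2 * P + r1 ∧ r2 * P + r1 < P * 10 := by
    constructor
    · nlinarith [hr2b.1, hr1b.1]
    · nlinarith [hr2b.2, hr1b.2]
  have e3 : num % (P * 10) = r2 * P + r1 :=
    modu _ _ q2 _ (by rw [hnum, hq1e]; ring) hrem.1 hrem.2
  have e4 : num / (P * 10) = q2 :=
    divu _ _ q2 _ (by positivity) (by rw [hnum, hq1e]; ring) hrem.1 hrem.2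
  rw [e1, e2, e3, e4]
  ring

-- one loop iteration of A maps the closed form for i to the closed form for i+1
theorem step_rotc (num : Int) (k i : Nat) (hi : i + 1 < k) :
    PySem.Int.mod (rotc num k i) 10 * (10 : Int) ^ (k - 1) + PySem.Int.floordiv (rotc num k i) 10 =
      rotc num k (i + 1) := by
  have hP : (0 : Int) < 10 ^ i := pow_pos (by norm_num) i
  have hP1 : (0 : Int) < 10 ^ (i + 1) := pow_pos (by norm_num) _
  have ek : (10 : Int) ^ k = 10 ^ i * 10 * 10 ^ (k - i - 1) := by
    rw [← pow_succ, ← pow_add]; congr 1; omega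
  have ek1 : (10 : Int) ^ (k - 1) = 10 ^ i * 10 ^ (k - i - 1) := by
    rw [← pow_add]; congr 1; omega
  have eki : (10 : Int) ^ (k - i) = 10 * 10 ^ (k - i - 1) := by
    rw [← pow_succ']; congr 1; omega
  have ei1 : (10 : Int) ^ (i + 1) = 10 ^ i * 10 := pow_succ 10 i
  simp only [rotc, PySem.Int.mod_eq_emod_of_pos (by norm_num : (0:Int) < 10),
    PySem.Int.floordiv_eq_ediv_of_pos (by norm_num : (0:Int) < 10),
    PySem.Int.mod_eq_emod_of_pos hP, PySem.Int.floordiv_eq_ediv_of_pos hP,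
    PySem.Int.mod_eq_emod_of_pos hP1, PySem.Int.floordiv_eq_ediv_of_pos hP1]
  rw [show k - (i + 1) = k - i - 1 by omega, eki, ek1, ei1]
  exact step_core num (10 ^ i) (10 ^ (k - i - 1)) hP

-- A's chained loop produces exactly B's closed forms
theorem chain (num : Int) (k : Nat) :
    ∀ (m i : Nat) (acc : List Int), i + m < k →
      (List.range m).foldl (fun (st : Int × List Int) _ =>
          (PySem.Int.mod st.1 10 * (10 : Int) ^ (k - 1) + PySem.Int.floordiv st.1 10,
           st.2 ++ [PySem.Int.mod st.1 10 * (10 : Int) ^ (k - 1) + PySem.Int.floordiv st.1 10]))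
        (rotc num k i, acc) =
      (rotc num k (i + m), acc ++ (List.range m).map (fun t => rotc num k (i + t + 1))) := by
  intro m
  induction m with
  | zero => intro i acc _; simp
  | succ m ih =>
    intro i acc h
    rw [List.range_succ, List.foldl_append, ih i acc (by omega)]
    simp only [List.foldl_cons, List.foldl_nil]
    have hs := step_rotc num k (i + m) (by omega)
    rw [PySem.Int.mod_eq_emod_of_pos (by norm_num : (0:Int) < 10),
        PySem.Int.floordiv_eq_ediv_of_pos (by norm_num : (0:Int) < 10)] at hs
    simp [hs, List.map_append, show i + (m + 1) = i + m + 1 by omega, List.append_assoc]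

-- the two ports' element lists coincide
theorem lists_eq (num : Int) :
    (let p := gcnDivLoop num 10 0
     let div := PySem.Int.floordiv p.1 10
     ((List.range p.2).foldl (fun (st : Int × List Int) _ =>
        (PySem.Int.mod st.1 10 * div + PySem.Int.floordiv st.1 10,
         st.2 ++ [PySem.Int.mod st.1 10 * div + PySem.Int.floordiv st.1 10])) (num, [num])).2) =
    (List.range (gcnNumDigits num 1)).map (fun i => rotc num (gcnNumDigits num 1) i) := by
  set K := gcnNumDigits num 1 with hK
  have hK1 : 1 ≤ K := gcnNumDigits_le num 1
  have hloop : gcnDivLoop num 10 0 = ((10 : Int) ^ K, K - 1) := by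
    have := gcnDivLoop_eq num 1 (le_refl 1)
    simpa using this
  have hdiv : PySem.Int.floordiv ((10 : Int) ^ K) 10 = (10 : Int) ^ (K - 1) := by
    rw [PySem.Int.floordiv_eq_ediv_of_pos (by norm_num),
        show (10 : Int) ^ K = 10 ^ (K - 1) * 10 by rw [← pow_succ]; congr 1; omega]
    exact Int.mul_ediv_cancel _ (by norm_num)
  simp only [hloop, hdiv]
  by_cases h10 : (10 : Int) ≤ num
  · have hK2 : 2 ≤ K := by
      have h2 : K = gcnNumDigits num 2 := by rw [hK, gcnNumDigits]; simp [pow_one, h10]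
      have := gcnNumDigits_le num 2
      omega
    have hc := chain num K (K - 1) 0 [num] (by omega)
    rw [rotc_zero] at hc
    rw [hc]
    rw [show K = (K - 1) + 1 by omega, List.range_succ_eq_map]
    simp [List.map_map, Function.comp, Nat.succ_eq_add_one, Nat.add_comm]
    rw [rotc_zero]
  · have hKe : K = 1 := by
      rw [hK, gcnNumDigits]
      simp [pow_one, h10]
    rw [hKe]
    simp [rotc_zero]

-- ===== VERDICT (by name: the statement is the Claim_ definition above) =====
theorem get_circular_nums_spec : Claim_equal_get_circular_nums := by
  unfold Claim_equal_get_circular_nums Spec_get_circular_nums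
  intro num _
  show get_circular_nums num = get_circular_nums_alt num
  unfold get_circular_nums get_circular_nums_alt
  exact congrArg PySem.Set.ofList (lists_eq num)
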